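-- pv_equiv track=rewrite | github.com/asharulhassan/notical | ai-pipeline/src/comprehensive_subject_scraper.py | _determine_subject_type
-- ===== SOURCE A (Python) =====
-- def _determine_subject_type(subject_name):
--     """Determine the type of subject"""
--     subject_lower = subject_name.lower()
--
--     if any(word in subject_lower for word in ['math', 'algebra', 'calculus', 'geometry']):
--         return 'Mathematics'
--     elif any(word in subject_lower for word in ['physics', 'mechanics', 'electricity', 'waves']):
--         return 'Physics'
--     elif any(word in subject_lower for word in ['chemistry', 'organic', 'inorganic', 'physical']):
--         return 'Chemistry'
--     elif any(word in subject_lower for word in ['biology', 'cell', 'genetics', 'ecology']):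
--         return 'Biology'
--     elif any(word in subject_lower for word in ['english', 'literature', 'language']):
--         return 'English'
--     elif any(word in subject_lower for word in ['business', 'economics', 'accounting', 'finance']):
--         return 'Business'
--     elif any(word in subject_lower for word in ['history', 'geography', 'politics']):
--         return 'Humanities'
--     elif any(word in subject_lower for word in ['computer', 'ict', 'programming']):
--         return 'Computer Science'
--     else:
--         return 'Other'
-- ===== SOURCE B (Python) =====
-- _KEYWORD_TO_CATEGORY = {
--     'math': 'Mathematics', 'algebra': 'Mathematics', 'calculus': 'Mathematics', 'geometry': 'Mathematics',
--     'physics': 'Physics', 'mechanics': 'Physics', 'electricity': 'Physics', 'waves': 'Physics',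
--     'chemistry': 'Chemistry', 'organic': 'Chemistry', 'inorganic': 'Chemistry', 'physical': 'Chemistry',
--     'biology': 'Biology', 'cell': 'Biology', 'genetics': 'Biology', 'ecology': 'Biology',
--     'english': 'English', 'literature': 'English', 'language': 'English',
--     'business': 'Business', 'economics': 'Business', 'accounting': 'Business', 'finance': 'Business',
--     'history': 'Humanities', 'geography': 'Humanities', 'politics': 'Humanities',
--     'computer': 'Computer Science', 'ict': 'Computer Science', 'programming': 'Computer Science',
-- }
--
-- _PRIORITY = ['Mathematics', 'Physics', 'Chemistry', 'Biology', 'English',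
--              'Business', 'Humanities', 'Computer Science']
--
-- def _determine_subject_type(subject_name):
--     subject_lower = subject_name.lower()
--     matched = {cat for kw, cat in _KEYWORD_TO_CATEGORY.items() if kw in subject_lower}
--     return next((cat for cat in _PRIORITY if cat in matched), 'Other')
-- ===== Notes on version B (the rewrite author's own statement) =====
-- stated objective: idiomatic
-- what changed: Inverts the per-category branch chain into a flat keyword-to-category dict: one full pass collects the set of matched categories without short-circuiting, then a second pass picks the first matched category in a fixed priority order.
import Mathlib
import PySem

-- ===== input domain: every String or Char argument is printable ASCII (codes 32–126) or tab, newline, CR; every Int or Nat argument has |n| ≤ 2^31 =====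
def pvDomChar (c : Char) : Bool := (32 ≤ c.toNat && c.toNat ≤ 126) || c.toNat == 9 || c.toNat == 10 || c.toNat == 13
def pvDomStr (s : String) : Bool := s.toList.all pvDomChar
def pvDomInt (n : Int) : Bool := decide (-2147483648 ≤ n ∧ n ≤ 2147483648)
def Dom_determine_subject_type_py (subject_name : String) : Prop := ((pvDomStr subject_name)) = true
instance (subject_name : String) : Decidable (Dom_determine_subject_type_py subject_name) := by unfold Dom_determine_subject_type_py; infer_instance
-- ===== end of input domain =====

-- B inverts the branch chain into a flat keyword→category map: one pass collects the SET of matched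
-- categories (no short-circuit), a second pass resolves the first category in priority order (idiomatic; same cost).

-- ===== PORT A =====
def determine_subject_type_py (subject_name : String) : String :=
  let subject_lower := PySem.Str.lower subject_name
  if ["math", "algebra", "calculus", "geometry"].any (fun word => PySem.Str.isIn word subject_lower) then
    "Mathematics"
  else if ["physics", "mechanics", "electricity", "waves"].any (fun word => PySem.Str.isIn word subject_lower) then
    "Physics"
  else if ["chemistry", "organic", "inorganic", "physical"].any (fun word => PySem.Str.isIn word subject_lower) then
    "Chemistry"
  else if ["biology", "cell", "genetics", "ecology"].any (fun word => PySem.Str.isIn word subject_lower) then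
    "Biology"
  else if ["english", "literature", "language"].any (fun word => PySem.Str.isIn word subject_lower) then
    "English"
  else if ["business", "economics", "accounting", "finance"].any (fun word => PySem.Str.isIn word subject_lower) then
    "Business"
  else if ["history", "geography", "politics"].any (fun word => PySem.Str.isIn word subject_lower) then
    "Humanities"
  else if ["computer", "ict", "programming"].any (fun word => PySem.Str.isIn word subject_lower) then
    "Computer Science"
  else
    "Other"

-- ===== PORT B =====
-- Python dict _KEYWORD_TO_CATEGORY as an association list in insertion order
def pvKeywordToCategory : List (String × String) :=
  [("math", "Mathematics"), ("algebra", "Mathematics"), ("calculus", "Mathematics"), ("geometry", "Mathematics"),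
   ("physics", "Physics"), ("mechanics", "Physics"), ("electricity", "Physics"), ("waves", "Physics"),
   ("chemistry", "Chemistry"), ("organic", "Chemistry"), ("inorganic", "Chemistry"), ("physical", "Chemistry"),
   ("biology", "Biology"), ("cell", "Biology"), ("genetics", "Biology"), ("ecology", "Biology"),
   ("english", "English"), ("literature", "English"), ("language", "English"),
   ("business", "Business"), ("economics", "Business"), ("accounting", "Business"), ("finance", "Business"),
   ("history", "Humanities"), ("geography", "Humanities"), ("politics", "Humanities"),
   ("computer", "Computer Science"), ("ict", "Computer Science"), ("programming", "Computer Science")]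

def pvPriority : List String :=
  ["Mathematics", "Physics", "Chemistry", "Biology", "English",
   "Business", "Humanities", "Computer Science"]

-- the set comprehension {cat for kw, cat in _KEYWORD_TO_CATEGORY.items() if kw in subject_lower}
def pvMatched (subject_lower : String) : PySem.Set String :=
  PySem.Set.ofList ((pvKeywordToCategory.filter (fun p => PySem.Str.isIn p.1 subject_lower)).map Prod.snd)

-- next((cat for cat in _PRIORITY if cat in matched), 'Other')
def pvFirstIn : List String → PySem.Set String → String
  | [], _ => "Other"
  | c :: rest, m => if PySem.Set.contains m c then c else pvFirstIn rest m

def determine_subject_type_py_alt (subject_name : String) : String :=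
  pvFirstIn pvPriority (pvMatched (PySem.Str.lower subject_name))

-- ===== PRECONDITION & SPEC =====
def Spec_determine_subject_type_py (subject_name : String) (out : String) : Prop := out = determine_subject_type_py_alt subject_name
instance (subject_name : String) (out : String) : Decidable (Spec_determine_subject_type_py subject_name out) := by unfold Spec_determine_subject_type_py; infer_instance

-- ===== CLAIM (what is proved, stated in full; the proofs are below) =====
def Claim_equal_determine_subject_type_py : Prop := ∀ (subject_name : String), Dom_determine_subject_type_py subject_name → Spec_determine_subject_type_py subject_name (determine_subject_type_py subject_name)

-- ===== LEMMAS AND PROOFS =====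

-- the matched set contains a category iff one of ITS keywords occurs (categories are pairwise distinct strings)
theorem pv_mem_Math (sl : String) : PySem.Set.contains (pvMatched sl) "Mathematics" =
    (PySem.Str.isIn "math" sl || PySem.Str.isIn "algebra" sl || PySem.Str.isIn "calculus" sl || PySem.Str.isIn "geometry" sl) := by
  rw [Bool.eq_iff_iff]
  simp [pvMatched, pvKeywordToCategory, PySem.Set.mem_ofList, List.mem_filter, or_assoc]

theorem pv_mem_Physics (sl : String) : PySem.Set.contains (pvMatched sl) "Physics" =
    (PySem.Str.isIn "physics" sl || PySem.Str.isIn "mechanics" sl || PySem.Str.isIn "electricity" sl || PySem.Str.isIn "waves" sl) := by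
  rw [Bool.eq_iff_iff]
  simp [pvMatched, pvKeywordToCategory, PySem.Set.mem_ofList, List.mem_filter, or_assoc]

theorem pv_mem_Chemistry (sl : String) : PySem.Set.contains (pvMatched sl) "Chemistry" =
    (PySem.Str.isIn "chemistry" sl || PySem.Str.isIn "organic" sl || PySem.Str.isIn "inorganic" sl || PySem.Str.isIn "physical" sl) := by
  rw [Bool.eq_iff_iff]
  simp [pvMatched, pvKeywordToCategory, PySem.Set.mem_ofList, List.mem_filter, or_assoc]

theorem pv_mem_Biology (sl : String) : PySem.Set.contains (pvMatched sl) "Biology" =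
    (PySem.Str.isIn "biology" sl || PySem.Str.isIn "cell" sl || PySem.Str.isIn "genetics" sl || PySem.Str.isIn "ecology" sl) := by
  rw [Bool.eq_iff_iff]
  simp [pvMatched, pvKeywordToCategory, PySem.Set.mem_ofList, List.mem_filter, or_assoc]

theorem pv_mem_English (sl : String) : PySem.Set.contains (pvMatched sl) "English" =
    (PySem.Str.isIn "english" sl || PySem.Str.isIn "literature" sl || PySem.Str.isIn "language" sl) := by
  rw [Bool.eq_iff_iff]
  simp [pvMatched, pvKeywordToCategory, PySem.Set.mem_ofList, List.mem_filter, or_assoc]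

theorem pv_mem_Business (sl : String) : PySem.Set.contains (pvMatched sl) "Business" =
    (PySem.Str.isIn "business" sl || PySem.Str.isIn "economics" sl || PySem.Str.isIn "accounting" sl || PySem.Str.isIn "finance" sl) := by
  rw [Bool.eq_iff_iff]
  simp [pvMatched, pvKeywordToCategory, PySem.Set.mem_ofList, List.mem_filter, or_assoc]

theorem pv_mem_Humanities (sl : String) : PySem.Set.contains (pvMatched sl) "Humanities" =
    (PySem.Str.isIn "history" sl || PySem.Str.isIn "geography" sl || PySem.Str.isIn "politics" sl) := by
  rw [Bool.eq_iff_iff]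
  simp [pvMatched, pvKeywordToCategory, PySem.Set.mem_ofList, List.mem_filter, or_assoc]

theorem pv_mem_ComputerScience (sl : String) : PySem.Set.contains (pvMatched sl) "Computer Science" =
    (PySem.Str.isIn "computer" sl || PySem.Str.isIn "ict" sl || PySem.Str.isIn "programming" sl) := by
  rw [Bool.eq_iff_iff]
  simp [pvMatched, pvKeywordToCategory, PySem.Set.mem_ofList, List.mem_filter, or_assoc]

theorem determine_subject_type_py_spec : Claim_equal_determine_subject_type_py := by
  intro s _
  unfold Spec_determine_subject_type_py determine_subject_type_py determine_subject_type_py_alt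
  simp only [pvPriority, pvFirstIn, pv_mem_Math, pv_mem_Physics, pv_mem_Chemistry, pv_mem_Biology, pv_mem_English, pv_mem_Business, pv_mem_Humanities, pv_mem_ComputerScience]
  simp [List.any, or_assoc]
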